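-- pv_equiv track=rewrite | github.com/Jin294/py_algo | 프로그래머스/0/181932. 코드 처리하기/코드 처리하기.py | solution
-- ===== SOURCE A (Python) =====
-- def solution(code):
--     answer = []
--     #시작할 때 mode는 0
--     mode = 0
--
--     for idx in range(len(code)):
--         if mode == 0:
--             if code[idx] == "1":
--                 mode = 1
--             elif (code[idx] != "1") and (idx % 2 == 0):
--                 answer.append(code[idx])
--         elif mode == 1:
--             if code[idx] == "1":
--                 mode = 0
--             elif (code[idx] != "1") and (idx % 2 == 1):
--                 answer.append(code[idx])
--
--     return ''.join(answer) if len(answer) > 0 else "EMPTY"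
-- ===== SOURCE B (Python) =====
-- def solution(code):
--     # pass 1: prefix-parity table; par[i] = (number of '1's in code[:i]) % 2, i.e. the mode entering index i
--     par = [0]
--     for c in code:
--         par.append((par[-1] + (c == '1')) % 2)
--     # pass 2: keep code[i] exactly when it is not '1' and i's parity equals the mode entering i
--     out = ''.join(c for (i, c), p in zip(enumerate(code), par) if c != '1' and i % 2 == p)
--     return out if out else "EMPTY"
-- ===== Notes on version B (the rewrite author's own statement) =====
-- stated objective: alternative
-- what changed: A's single stateful loop (a mode variable toggled by '1's, appending as it goes) is replaced by a two-pass form: first a prefix-parity table par with par[i] = number of '1's before index i mod 2, then a filtering comprehension over zip(enumerate(code), par) keeping code[i] when it is not '1' and i % 2 equals par[i].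
import Mathlib
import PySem

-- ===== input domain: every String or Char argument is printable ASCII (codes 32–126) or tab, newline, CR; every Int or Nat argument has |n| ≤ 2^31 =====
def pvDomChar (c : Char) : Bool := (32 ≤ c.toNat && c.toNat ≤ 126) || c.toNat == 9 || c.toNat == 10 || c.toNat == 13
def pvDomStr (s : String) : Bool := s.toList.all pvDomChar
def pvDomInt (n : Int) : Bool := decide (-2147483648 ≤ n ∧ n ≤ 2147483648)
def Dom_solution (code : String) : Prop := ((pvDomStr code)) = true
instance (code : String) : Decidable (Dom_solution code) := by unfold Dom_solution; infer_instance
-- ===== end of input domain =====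

-- B replaces A's single stateful toggle-and-append loop by a two-pass form (prefix-parity
-- table, then a filtering comprehension); objective: alternative decomposition, same cost.

-- ===== PORT A =====
-- A: one loop over indices with a mode toggled by '1's, appending code[idx] when idx's parity matches the mode.
def solution (code : String) : String :=
  let cs := code.toList
  let st := (PySem.List.pyRange 0 (cs.length : Int) 1).foldl
    (fun (st : List Char × Int) idx =>
      let answer := st.1
      let mode := st.2
      let c := PySem.List.pyGetD cs idx ' '
      if mode == 0 then
        if c == '1' then (answer, 1)
        else if c != '1' && (PySem.Int.mod idx 2 == 0) then (answer ++ [c], mode)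
        else (answer, mode)
      else if mode == 1 then
        if c == '1' then (answer, 0)
        else if c != '1' && (PySem.Int.mod idx 2 == 1) then (answer ++ [c], mode)
        else (answer, mode)
      else (answer, mode))
    ([], 0)
  if st.1.length > 0 then String.mk st.1 else "EMPTY"

-- ===== PORT B =====
-- B: pass 1 builds par (par[i] = parity of '1's strictly before i), pass 2 filters zip(enumerate(code), par).
def solution_alt (code : String) : String :=
  let cs := code.toList
  let par := cs.foldl
    (fun (par : List Int) c =>
      par ++ [PySem.Int.mod (PySem.List.pyGetD par (-1) 0 + (if c == '1' then 1 else 0)) 2])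
    [(0 : Int)]
  let out := ((PySem.List.enumerate cs 0).zip par).filterMap
    (fun x => if x.1.2 != '1' && (PySem.Int.mod x.1.1 2 == x.2) then some x.1.2 else none)
  if out ≠ [] then String.mk out else "EMPTY"

-- ===== PRECONDITION & SPEC =====
def Spec_solution (code : String) (out : String) : Prop := out = solution_alt code
instance (code : String) (out : String) : Decidable (Spec_solution code out) := by unfold Spec_solution; infer_instance

-- ===== CLAIM (what is proved, stated in full; the proofs are below) =====
def Claim_equal_solution : Prop := ∀ (code : String), Dom_solution code → Spec_solution code (solution code)

-- ===== LEMMAS AND PROOFS =====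

-- the common specification: characters kept when scanning cs from index s with entering mode m
def pvSel : List Char → Int → Int → List Char
  | [], _, _ => []
  | c :: cs, s, m =>
    if c = '1' then pvSel cs (s + 1) (1 - m)
    else if PySem.Int.mod s 2 = m then c :: pvSel cs (s + 1) m
    else pvSel cs (s + 1) m

-- the prefix-parity tail: parities entering each index after a prefix of parity p
def pvParFrom : Int → List Char → List Int
  | _, [] => []
  | p, c :: cs =>
    let q := PySem.Int.mod (p + (if c == '1' then 1 else 0)) 2
    q :: pvParFrom q cs

theorem pvPar_build (cs : List Char) :
    ∀ (l : List Int) (p : Int),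
      cs.foldl
        (fun (par : List Int) c =>
          par ++ [PySem.Int.mod (PySem.List.pyGetD par (-1) 0 + (if c == '1' then 1 else 0)) 2])
        (l ++ [p]) =
      l ++ [p] ++ pvParFrom p cs := by
  induction cs with
  | nil => intro l p; simp [pvParFrom]
  | cons c cs ih =>
    intro l p
    simp only [List.foldl_cons, PySem.List.pyGetD_neg_one_append_singleton, pvParFrom]
    rw [ih (l ++ [p])]
    simp

theorem pvA_core (cs : List Char) :
    ∀ (s : Int) (ans : List Char) (m : Int), (m = 0 ∨ m = 1) →
      ((PySem.List.enumerate cs s).foldl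
        (fun (st : List Char × Int) x =>
          let answer := st.1
          let mode := st.2
          let c := x.2
          if mode == 0 then
            if c == '1' then (answer, 1)
            else if c != '1' && (PySem.Int.mod x.1 2 == 0) then (answer ++ [c], mode)
            else (answer, mode)
          else if mode == 1 then
            if c == '1' then (answer, 0)
            else if c != '1' && (PySem.Int.mod x.1 2 == 1) then (answer ++ [c], mode)
            else (answer, mode)
          else (answer, mode))
        (ans, m)).1 = ans ++ pvSel cs s m := by
  induction cs with
  | nil => intro s ans m _; simp [pvSel, PySem.List.enumerate_nil]
  | cons c cs ih =>
    intro s ans m hm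
    rw [PySem.List.enumerate_cons, List.foldl_cons]
    rcases hm with h | h <;> subst h
    · by_cases hc : c = '1'
      · simpa [hc, pvSel] using ih (s + 1) ans 1 (Or.inr rfl)
      · by_cases hmod : Int.fmod s 2 = 0
        · simpa [hc, hmod, pvSel, PySem.Int.mod] using ih (s + 1) (ans ++ [c]) 0 (Or.inl rfl)
        · simpa [hc, hmod, pvSel, PySem.Int.mod] using ih (s + 1) ans 0 (Or.inl rfl)
    · by_cases hc : c = '1'
      · simpa [hc, pvSel] using ih (s + 1) ans 0 (Or.inl rfl)
      · by_cases hmod : Int.fmod s 2 = 1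
        · simpa [hc, hmod, pvSel, PySem.Int.mod] using ih (s + 1) (ans ++ [c]) 1 (Or.inr rfl)
        · simpa [hc, hmod, pvSel, PySem.Int.mod] using ih (s + 1) ans 1 (Or.inr rfl)

theorem pvB_core (cs : List Char) :
    ∀ (s : Int) (p : Int), (p = 0 ∨ p = 1) →
      ((PySem.List.enumerate cs s).zip (p :: pvParFrom p cs)).filterMap
        (fun x => if x.1.2 != '1' && (PySem.Int.mod x.1.1 2 == x.2) then some x.1.2 else none)
        = pvSel cs s p := by
  induction cs with
  | nil => intro s p _; simp [pvSel, PySem.List.enumerate_nil]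
  | cons c cs ih =>
    intro s p hp
    rw [PySem.List.enumerate_cons]
    rcases hp with h | h <;> subst h <;> by_cases hc : c = '1'
    · simpa [hc, pvSel, pvParFrom] using ih (s + 1) 1 (Or.inr rfl)
    · by_cases hmod : Int.fmod s 2 = 0
      · simpa [hc, hmod, pvSel, pvParFrom, PySem.Int.mod] using ih (s + 1) 0 (Or.inl rfl)
      · simpa [hc, hmod, pvSel, pvParFrom, PySem.Int.mod] using ih (s + 1) 0 (Or.inl rfl)
    · simpa [hc, pvSel, pvParFrom] using ih (s + 1) 0 (Or.inl rfl)
    · by_cases hmod : Int.fmod s 2 = 1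
      · simpa [hc, hmod, pvSel, pvParFrom, PySem.Int.mod] using ih (s + 1) 1 (Or.inr rfl)
      · simpa [hc, hmod, pvSel, pvParFrom, PySem.Int.mod] using ih (s + 1) 1 (Or.inr rfl)

theorem solution_eq_alt (code : String) : solution code = solution_alt code := by
  unfold solution solution_alt
  dsimp only
  have hA := pvA_core code.toList 0 [] 0 (Or.inl rfl)
  rw [PySem.List.enumerate_eq_map_pyRange code.toList ' ', List.foldl_map] at hA
  have hpar := pvPar_build code.toList [] 0
  have hB := pvB_core code.toList 0 0 (Or.inl rfl)
  simp only [List.nil_append, PySem.List.len_eq] at hA hpar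
  rw [hpar, hA]
  simp only [List.singleton_append]
  rw [hB]
  cases pvSel code.toList 0 0 <;> simp

-- ===== VERDICT (by name: the statement is the Claim_ definition above) =====
theorem solution_spec : Claim_equal_solution := by
  intro code _
  unfold Spec_solution
  exact solution_eq_alt code
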